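-- pv_equiv track=rewrite | github.com/aandresalvarez/researcher | src/uamm/verification/faithfulness.py | _sentences
-- ===== SOURCE A (Python) =====
-- from typing import Any, Iterable, List, Mapping, Sequence, Tuple
--
-- def _dedupe(seq: Iterable[str]) -> List[str]:
--     seen: set[str] = set()
--     out: List[str] = []
--     for s in seq:
--         if s not in seen:
--             seen.add(s)
--             out.append(s)
--     return out
--
-- def _sentences(text: str) -> List[str]:
--     # Very light sentence splitter on punctuation and newlines.
--     raw = (text or "").replace("\n", ". ")
--     parts: List[str] = []
--     start = 0
--     for i, ch in enumerate(raw):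
--         if ch in ".!?":
--             seg = raw[start : i + 1].strip()
--             if seg:
--                 parts.append(seg)
--             start = i + 1
--     tail = raw[start:].strip()
--     if tail:
--         parts.append(tail)
--     return _dedupe([p.strip() for p in parts if p.strip()])
-- ===== SOURCE B (Python) =====
-- import re
-- from typing import List
--
--
-- def _sentences(text: str) -> List[str]:
--     raw = (text or "").replace("\n", ". ")
--     # Split keeps each terminator as its own piece: pieces alternate
--     # [segment, terminator, segment, terminator, ..., final segment].
--     pieces = re.split(r"([.!?])", raw)
--     chunks = [seg + term for seg, term in zip(pieces[0::2], pieces[1::2] + [""])]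
--     stripped = [c.strip() for c in chunks]
--     return list(dict.fromkeys(s for s in stripped if s))
-- ===== Notes on version B (the rewrite author's own statement) =====
-- stated objective: idiomatic
-- what changed: Replaces A's single index-bookkeeping character scan with manual slicing, a tail branch and a hand-written seen-set dedupe loop by staged passes: re.split keeping the terminators, re-pairing segment+terminator via zip of strided slices, then list(dict.fromkeys(...)) for the order-preserving dedupe (the _dedupe helper disappears).
import Mathlib
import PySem

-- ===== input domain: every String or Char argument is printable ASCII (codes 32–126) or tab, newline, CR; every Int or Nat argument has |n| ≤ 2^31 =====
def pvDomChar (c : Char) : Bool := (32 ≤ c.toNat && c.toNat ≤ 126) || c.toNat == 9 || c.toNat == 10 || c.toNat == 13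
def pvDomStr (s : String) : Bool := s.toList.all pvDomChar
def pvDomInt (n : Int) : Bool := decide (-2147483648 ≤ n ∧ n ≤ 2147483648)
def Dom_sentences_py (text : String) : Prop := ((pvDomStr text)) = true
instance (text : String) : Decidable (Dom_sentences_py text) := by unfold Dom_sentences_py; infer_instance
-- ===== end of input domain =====

-- B replaces A's single index-bookkeeping scan (explicit `start` index, slicing, tail
-- branch, hand-written seen-set dedupe) by staged passes: re.split keeping the
-- terminators, re-pair segment+terminator via zip of strided slices, then
-- list(dict.fromkeys(...)) for the dedupe; objective: idiomatic, same cost.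

-- ===== PORT A =====
-- 'ch in ".!?"' for a single character
def pvPunct (c : Char) : Bool := c == '.' || c == '!' || c == '?'

-- A's helper _dedupe: seen-set + output-list loop
def pvDedupe (seq : List (List Char)) : List (List Char) :=
  (seq.foldl
    (fun (st : PySem.Set (List Char) × List (List Char)) s =>
      if PySem.Set.contains st.1 s then st else (PySem.Set.add st.1 s, st.2 ++ [s]))
    (PySem.Set.empty, [])).2

-- the 'for i, ch in enumerate(raw)' loop of A, as structural recursion over enumerate's list
def pvLoopA (raw : List Char) (rest : List (Int × Char)) (start : Int)
    (parts : List (List Char)) : Int × List (List Char) :=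
  match rest with
  | [] => (start, parts)
  | (i, ch) :: rs =>
    if pvPunct ch then
      let seg := PySem.Chars.strip (PySem.List.slice raw (some start) (some (i + 1)))
      pvLoopA raw rs (i + 1) (if seg.isEmpty then parts else parts ++ [seg])
    else
      pvLoopA raw rs start parts

def sentences_py (text : String) : List String :=
  let raw := PySem.Chars.replace text.toList ['\n'] ['.', ' ']
  let sp := pvLoopA raw (PySem.List.enumerate raw 0) 0 []
  let tail := PySem.Chars.strip (PySem.List.slice raw (some sp.1) none)
  let parts := if tail.isEmpty then sp.2 else sp.2 ++ [tail]
  (pvDedupe ((parts.filter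
      (fun p => !(PySem.Chars.strip p).isEmpty)).map PySem.Chars.strip)).map String.ofList

-- ===== PORT B =====
-- hand port of re.split(r'([.!?])', raw) for this fixed one-character-class pattern:
-- the result alternates [segment, terminator, segment, …, final segment]; exact because
-- each match of the pattern is exactly one '.', '!' or '?' character.
def pvPieces (cs : List Char) : List (List Char) :=
  match h : cs.dropWhile (fun c => !pvPunct c) with
  | [] => [cs]
  | p :: rest => (cs.takeWhile (fun c => !pvPunct c)) :: [p] :: pvPieces rest
termination_by cs.length
decreasing_by
  have := List.IsSuffix.length_le (List.dropWhile_suffix (l := cs) (p := fun c => !pvPunct c))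
  simp [h] at this; omega

-- '[seg + term for seg, term in zip(pieces[0::2], pieces[1::2] + [""])]': since pieces
-- alternates segment/terminator (odd length), zipping the even-index and odd-index
-- strides pairs consecutive elements, the final segment being paired with "".
def pvZipChunks (ps : List (List Char)) : List (List Char) :=
  match ps with
  | [] => []
  | [seg] => [seg ++ []]
  | seg :: term :: rest => (seg ++ term) :: pvZipChunks rest

-- 'list(dict.fromkeys(...))': build an insertion-ordered dict keyed by the items, take keys
def pvFromKeys (xs : List (List Char)) : List (List Char) :=
  PySem.Dict.keys
    (xs.foldl (fun (d : PySem.Dict (List Char) Unit) s => PySem.Dict.insert d s ())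
      PySem.Dict.empty)

def sentences_py_alt (text : String) : List String :=
  let raw := PySem.Chars.replace text.toList ['\n'] ['.', ' ']
  let chunks := pvZipChunks (pvPieces raw)
  let stripped := chunks.map PySem.Chars.strip
  (pvFromKeys (stripped.filter (fun s => !s.isEmpty))).map String.ofList

-- ===== PRECONDITION & SPEC =====
def Spec_sentences_py (text : String) (out : List String) : Prop := out = sentences_py_alt text
instance (text : String) (out : List String) : Decidable (Spec_sentences_py text out) := by unfold Spec_sentences_py; infer_instance

-- ===== CLAIM (what is proved, stated in full; the proofs are below) =====
def Claim_equal_sentences_py : Prop := ∀ (text : String), Dom_sentences_py text → Spec_sentences_py text (sentences_py text)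


-- ===== LEMMAS AND PROOFS =====

-- proof-side characterisation of A's scan: the punctuation-terminated tokens plus tail
def pvTokens (cs : List Char) : List (List Char) :=
  match h : cs.dropWhile (fun c => !pvPunct c) with
  | [] => if cs.isEmpty then [] else [cs]
  | p :: rest =>
    (cs.takeWhile (fun c => !pvPunct c) ++ [p]) :: pvTokens rest
termination_by cs.length
decreasing_by
  have := List.IsSuffix.length_le (List.dropWhile_suffix (l := cs) (p := fun c => !pvPunct c))
  simp [h] at this; omega

-- the tail step of A (compute the tail from the final start index, append if nonempty)
def pvFinish (raw : List Char) (sp : Int × List (List Char)) : List (List Char) :=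
  let tail := PySem.Chars.strip (PySem.List.slice raw (some sp.1) none)
  if tail.isEmpty then sp.2 else sp.2 ++ [tail]

theorem pv_dropWhile_cons {p : Char → Bool} {l t : List Char} {c : Char}
    (h : l.dropWhile p = c :: t) : p c = false := by
  induction l with
  | nil => simp at h
  | cons a l ih =>
    by_cases ha : p a
    · rw [List.dropWhile_cons_of_pos ha] at h; exact ih h
    · rw [List.dropWhile_cons_of_neg ha] at h
      obtain ⟨rfl, -⟩ := List.cons.inj h
      simpa using ha

theorem pv_dropWhile_idem (p : Char → Bool) (l : List Char) :
    (l.dropWhile p).dropWhile p = l.dropWhile p := by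
  cases h : l.dropWhile p with
  | nil => simp
  | cons c t => rw [List.dropWhile_cons_of_neg]; simp [pv_dropWhile_cons h]

-- strip is idempotent
theorem pv_strip_strip (s : List Char) :
    PySem.Chars.strip (PySem.Chars.strip s) = PySem.Chars.strip s := by
  simp only [PySem.Chars.strip, PySem.Chars.lstrip, PySem.Chars.rstrip]
  set ws := PySem.Chars.isspace with hws
  set t := s.dropWhile ws with ht
  set u := t.reverse.dropWhile ws with hu
  obtain ⟨v, hv⟩ : u <:+ t.reverse := List.dropWhile_suffix ws
  have hR : u.reverse.dropWhile ws = u.reverse := by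
    cases hRc : u.reverse with
    | nil => simp
    | cons d R' =>
      have htR : t = d :: (R' ++ v.reverse) := by
        have h3 : t = u.reverse ++ v.reverse := by
          have := congrArg List.reverse hv
          simpa using this.symm
        rw [h3, hRc]; simp
      have hd : ws d = false := pv_dropWhile_cons (htR ▸ ht.symm)
      rw [List.dropWhile_cons_of_neg]; simp [hd]
  rw [hR, List.reverse_reverse]
  conv_lhs => rw [hu]
  rw [pv_dropWhile_idem, ← hu]

theorem pv_strip_nil : PySem.Chars.strip ([] : List Char) = [] := by
  simp [PySem.Chars.strip, PySem.Chars.lstrip, PySem.Chars.rstrip]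

-- tokens of a punctuation-free list
theorem pv_tokens_no_punct (cs : List Char) (h : ∀ c ∈ cs, pvPunct c = false) :
    pvTokens cs = if cs.isEmpty then [] else [cs] := by
  have hd : cs.dropWhile (fun c => !pvPunct c) = [] := by
    rw [List.dropWhile_eq_nil_iff]
    intro c hc; simp [h c hc]
  rw [pvTokens.eq_def]
  split
  · rfl
  · next p rest heq => rw [hd] at heq; simp at heq

-- dropWhile / takeWhile across a punctuation-free prefix and a terminator
theorem pv_dw (pending : List Char) (c : Char) (rs : List Char)
    (hp : ∀ x ∈ pending, pvPunct x = false) (hc : pvPunct c = true) :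
    (pending ++ c :: rs).dropWhile (fun x => !pvPunct x) = c :: rs := by
  induction pending with
  | nil =>
    simp only [List.nil_append]
    rw [List.dropWhile_cons_of_neg (by simp [hc])]
  | cons a l ih =>
    simp only [List.cons_append]
    rw [List.dropWhile_cons_of_pos (by simp [hp a (by simp)])]
    exact ih (fun x hx => hp x (by simp [hx]))

theorem pv_tw (pending : List Char) (c : Char) (rs : List Char)
    (hp : ∀ x ∈ pending, pvPunct x = false) (hc : pvPunct c = true) :
    (pending ++ c :: rs).takeWhile (fun x => !pvPunct x) = pending := by
  induction pending with
  | nil =>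
    simp only [List.nil_append]
    rw [List.takeWhile_cons_of_neg (by simp [hc])]
  | cons a l ih =>
    simp only [List.cons_append]
    rw [List.takeWhile_cons_of_pos (by simp [hp a (by simp)])]
    rw [ih (fun x hx => hp x (by simp [hx]))]

-- tokens after a punctuation-free prefix followed by a terminator
theorem pv_tokens_punct (pending : List Char) (c : Char) (rs : List Char)
    (hp : ∀ x ∈ pending, pvPunct x = false) (hc : pvPunct c = true) :
    pvTokens (pending ++ c :: rs) = (pending ++ [c]) :: pvTokens rs := by
  have hd := pv_dw pending c rs hp hc
  have htk := pv_tw pending c rs hp hc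
  rw [pvTokens.eq_def]
  split
  · next heq => rw [hd] at heq; simp at heq
  · next p rest heq =>
    rw [hd] at heq
    obtain ⟨rfl, rfl⟩ := List.cons.inj heq
    rw [htk]

-- the loop invariant: A's scan + tail branch produce exactly the stripped nonempty tokens
theorem pv_loop_inv (rest : List Char) : ∀ (raw pending : List Char) (s : Nat)
    (parts : List (List Char)),
    raw.drop s = pending ++ rest →
    (∀ c ∈ pending, pvPunct c = false) →
    pvFinish raw (pvLoopA raw
        (PySem.List.enumerate rest ((s : Int) + pending.length)) (s : Int) parts)
    = parts ++ ((pvTokens (pending ++ rest)).map PySem.Chars.strip).filter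
        (fun p => !p.isEmpty) := by
  induction rest with
  | nil =>
    intro raw pending s parts h1 h2
    rw [List.append_nil] at h1
    simp only [List.append_nil]
    simp only [PySem.List.enumerate_nil, pvLoopA, pvFinish]
    rw [PySem.List.slice_from_natCast, h1]
    rw [pv_tokens_no_punct pending h2]
    cases pending with
    | nil => simp [pv_strip_nil]
    | cons a l =>
      simp only [List.isEmpty_cons, Bool.false_eq_true, if_false, List.map_cons,
        List.map_nil, List.filter]
      cases hE : (PySem.Chars.strip (a :: l)).isEmpty
      · simp [hE]
      · simp [hE]
  | cons c rs ih =>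
    intro raw pending s parts h1 h2
    rw [PySem.List.enumerate_cons]
    simp only [pvLoopA]
    by_cases hc : pvPunct c = true
    · rw [if_pos hc]
      have hcast : (s : Int) + (pending.length : Int) + 1
          = ((s + pending.length + 1 : Nat) : Int) := by push_cast; ring
      have hslice : PySem.List.slice raw (some (s : Int))
          (some ((s + pending.length + 1 : Nat) : Int)) = pending ++ [c] := by
        rw [PySem.List.slice_natCast]
        rw [h1]
        have h4 : s + pending.length + 1 - s = pending.length + 1 := by omega
        rw [h4, List.take_append]
        simp
      have hdrop : raw.drop (s + pending.length + 1) = rs := by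
        rw [show s + pending.length + 1 = s + (pending.length + 1) from by omega]
        rw [← List.drop_drop, h1]
        rw [show pending ++ c :: rs = (pending ++ [c]) ++ rs from by simp]
        rw [List.drop_left' (by simp)]
      have hIH := ih raw [] (s + pending.length + 1)
        (if (PySem.Chars.strip (pending ++ [c])).isEmpty then parts
         else parts ++ [PySem.Chars.strip (pending ++ [c])])
        (by simpa using hdrop) (by simp)
      simp only [List.length_nil, Nat.cast_zero, add_zero, List.nil_append] at hIH
      rw [hcast, hslice, hIH]
      rw [pv_tokens_punct pending c rs h2 hc]
      simp only [List.map_cons, List.filter]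
      cases hE : (PySem.Chars.strip (pending ++ [c])).isEmpty
      · simp [hE]
      · simp [hE]
    · rw [if_neg hc]
      have hIH := ih raw (pending ++ [c]) s parts
        (by rw [h1]; simp)
        (by intro x hx
            rcases List.mem_append.mp hx with h | h
            · exact h2 x h
            · simp at h; subst h; simpa using hc)
      rw [show ((s : Int) + (((pending ++ [c]).length : Nat) : Int)) =
        (s : Int) + (pending.length : Int) + 1 from by push_cast; simp; ring] at hIH
      rw [hIH]
      simp

-- every element of the filtered stripped token list is a nonempty strip-fixed point
theorem pv_post (X : List (List Char))
    (hX : ∀ p ∈ X, PySem.Chars.strip p = p ∧ p.isEmpty = false) :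
    (X.filter (fun p => !(PySem.Chars.strip p).isEmpty)).map PySem.Chars.strip = X := by
  have hf : X.filter (fun p => !(PySem.Chars.strip p).isEmpty) = X := by
    rw [List.filter_eq_self]
    intro p hp
    rw [(hX p hp).1, (hX p hp).2]
    rfl
  rw [hf]
  rw [List.map_congr_left (fun p hp => (hX p hp).1)]
  simp

-- B's chunks and A's tokens agree once empty chunks are stripped and filtered out
theorem pv_chunks_tokens_aux : ∀ (n : Nat) (cs : List Char), cs.length ≤ n →
    ((pvZipChunks (pvPieces cs)).map PySem.Chars.strip).filter (fun s => !s.isEmpty)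
    = ((pvTokens cs).map PySem.Chars.strip).filter (fun s => !s.isEmpty) := by
  intro n
  induction n with
  | zero =>
    intro cs h
    have : cs = [] := List.length_eq_zero_iff.mp (by omega)
    subst this
    simp [pvPieces, pvZipChunks, pvTokens, pv_strip_nil]
  | succ n ih =>
    intro cs hlen
    rw [pvPieces.eq_def, pvTokens.eq_def]
    cases h : cs.dropWhile (fun c => !pvPunct c) with
    | nil =>
      simp only [pvZipChunks, List.append_nil]
      cases hcs : cs with
      | nil => simp [pv_strip_nil]
      | cons a l => simp
    | cons p rest =>
      have hr : rest.length < cs.length := by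
        have := List.IsSuffix.length_le
          (List.dropWhile_suffix (l := cs) (p := fun c => !pvPunct c))
        simp [h] at this; omega
      simp only [pvZipChunks, List.map_cons, List.filter_cons]
      rw [ih rest (by omega)]

theorem pv_chunks_tokens (cs : List Char) :
    ((pvZipChunks (pvPieces cs)).map PySem.Chars.strip).filter (fun s => !s.isEmpty)
    = ((pvTokens cs).map PySem.Chars.strip).filter (fun s => !s.isEmpty) :=
  pv_chunks_tokens_aux cs.length cs le_rfl

-- A's _dedupe loop keeps exactly the first occurrences: it builds set(xs) in order
theorem pv_dedupe_aux (xs : List (List Char)) : ∀ (s : PySem.Set (List Char)),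
    xs.foldl
      (fun (st : PySem.Set (List Char) × List (List Char)) x =>
        if PySem.Set.contains st.1 x then st else (PySem.Set.add st.1 x, st.2 ++ [x]))
      (s, s)
    = (xs.foldl PySem.Set.add s, xs.foldl PySem.Set.add s) := by
  induction xs with
  | nil => intro s; rfl
  | cons x l ih =>
    intro s
    simp only [List.foldl_cons]
    by_cases hm : x ∈ s
    · rw [if_pos (by simpa [PySem.Set.contains_iff] using hm)]
      rw [PySem.Set.add_of_mem hm, ih s]
    · rw [if_neg (by simpa [PySem.Set.contains_iff] using hm)]
      rw [show s ++ [x] = PySem.Set.add s x from (PySem.Set.add_of_not_mem hm).symm]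
      exact ih (PySem.Set.add s x)

theorem pv_dedupe_eq_ofList (xs : List (List Char)) :
    pvDedupe xs = PySem.Set.ofList xs := by
  unfold pvDedupe
  have h := pv_dedupe_aux xs PySem.Set.empty
  rw [show (PySem.Set.empty, ([] : List (List Char)))
      = ((PySem.Set.empty : PySem.Set (List Char)), (PySem.Set.empty : List (List Char)))
      from rfl, h]
  rw [PySem.Set.ofList_eq_foldl]
  rfl

-- dict.fromkeys builds set(xs) in insertion order too
theorem pv_fromkeys_eq_ofList (xs : List (List Char)) :
    pvFromKeys xs = PySem.Set.ofList xs := by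
  unfold pvFromKeys
  rw [PySem.Dict.keys_foldl_insert (f := fun _ _ => ())]
  rw [show PySem.Dict.keys (PySem.Dict.empty : PySem.Dict (List Char) Unit) = [] from rfl]
  exact PySem.Set.update_nil_left xs

-- ===== VERDICT (by name: the statement is the Claim_ definition above) =====
theorem sentences_py_spec : Claim_equal_sentences_py := by
  intro text _
  show sentences_py text = sentences_py_alt text
  simp only [sentences_py, sentences_py_alt]
  set raw := PySem.Chars.replace text.toList ['\n'] ['.', ' '] with hraw
  have hloop := pv_loop_inv raw raw [] 0 [] (by simp) (by simp)
  simp only [List.length_nil, Nat.cast_zero, add_zero, List.nil_append] at hloop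
  simp only [pvFinish] at hloop
  rw [hloop]
  have hA := pv_post (((pvTokens raw).map PySem.Chars.strip).filter (fun p => !p.isEmpty))
    (by intro p hp
        rw [List.mem_filter] at hp
        obtain ⟨hm, hne⟩ := hp
        rw [List.mem_map] at hm
        obtain ⟨t, -, rfl⟩ := hm
        exact ⟨pv_strip_strip t, by simpa using hne⟩)
  rw [hA, pv_dedupe_eq_ofList, pv_fromkeys_eq_ofList, pv_chunks_tokens]
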